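-- pv_equiv track=rewrite | github.com/vivekteega/ftt-testnet-mod | parsing.py | extractContractType
-- ===== SOURCE A (Python) =====
-- def extractContractType(text):
--     # keep everything lowercase
--     operationList = ['one-time-event*', 'continuous-event*']
--     count = 0
--     returnval = None
--     for operation in operationList:
--         count = count + text.count(operation)
--         if count > 1:
--             return 'Too many'
--         if count == 1 and (returnval is None):
--             returnval = operation
--     return returnval
-- ===== SOURCE B (Python) =====
-- def extractContractType(text):
--     # Positional scan: collect every marker occurrence in text order, then decide
--     # from the list of occurrences (no str.count).
--     ops = ('one-time-event*', 'continuous-event*')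
--     found = [op for i in range(len(text)) for op in ops if text.startswith(op, i)]
--     if len(found) > 1:
--         return 'Too many'
--     return found[0] if found else None
-- ===== Notes on version B (the rewrite author's own statement) =====
-- stated objective: alternative
-- what changed: Instead of calling str.count per marker and accumulating a running total, B scans the text positions once, collecting every marker occurrence (via startswith at each index) into a list in text order, and decides from that occurrence list: more than one occurrence gives the over-count sentinel, exactly one gives that marker, none gives None; correct because both markers are border-free, so positional occurrences equal str.count's non-overlapping count.
import Mathlib
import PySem

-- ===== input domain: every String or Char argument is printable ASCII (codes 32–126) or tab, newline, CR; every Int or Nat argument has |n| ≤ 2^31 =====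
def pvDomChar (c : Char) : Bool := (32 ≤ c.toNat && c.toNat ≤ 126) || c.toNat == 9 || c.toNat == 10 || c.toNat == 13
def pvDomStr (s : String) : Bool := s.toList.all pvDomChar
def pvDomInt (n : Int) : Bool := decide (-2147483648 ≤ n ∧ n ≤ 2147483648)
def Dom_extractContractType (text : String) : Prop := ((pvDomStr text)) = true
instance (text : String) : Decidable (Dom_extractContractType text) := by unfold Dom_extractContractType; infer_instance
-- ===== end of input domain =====

-- B replaces A's per-marker str.count accumulation with a single positional scan that
-- collects every marker occurrence into a list and decides from that list (objective: alternative).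

-- ===== PORT A =====
-- loop of A: state (count, returnval), early return on count > 1
def extractA_loop (text : String) : List String → Int → Option String → Option String
  | [], _, returnval => returnval
  | op :: rest, count, returnval =>
    let count := count + (PySem.Str.count text op : Int)
    if count > 1 then some "Too many"
    else extractA_loop text rest count
      (if count == 1 && returnval.isNone then some op else returnval)

def extractContractType (text : String) : Option String :=
  extractA_loop text ["one-time-event*", "continuous-event*"] 0 none

-- ===== PORT B =====
-- B: 'found = [op for i in range(len(text)) for op in ops if text.startswith(op, i)]'
-- text.startswith(op, i) with 0 ≤ i is exactly: op is a prefix of text[i:] — ported as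
-- PySem.Chars.startswith (tl.drop i) op.toList (exact on nonnegative start offsets).
def extractContractType_alt (text : String) : Option String :=
  let ops := ["one-time-event*", "continuous-event*"]
  let tl := text.toList
  let found := (List.range tl.length).flatMap
    (fun i => ops.filter (fun op => PySem.Chars.startswith (tl.drop i) op.toList))
  if found.length > 1 then some "Too many"
  else
    match found with
    | f :: _ => some f
    | [] => none

-- ===== PRECONDITION & SPEC =====
def Spec_extractContractType (text : String) (out : Option String) : Prop := out = extractContractType_alt text
instance (text : String) (out : Option String) : Decidable (Spec_extractContractType text out) := by unfold Spec_extractContractType; infer_instance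

-- ===== CLAIM (what is proved, stated in full; the proofs are below) =====
def Claim_equal_extractContractType : Prop := ∀ (text : String), Dom_extractContractType text → Spec_extractContractType text (extractContractType text)

-- ===== LEMMAS AND PROOFS =====
def occCount (p l : List Char) : Nat :=
  (List.range l.length).countP (fun i => p.isPrefixOf (l.drop i))
theorem occCount_cons (p : List Char) (c : Char) (t : List Char) :
    occCount p (c :: t) = (if p.isPrefixOf (c :: t) then 1 else 0) + occCount p t := by
  simp [occCount, List.range_succ_eq_map, List.countP_cons, List.countP_map, Function.comp_def]
  omega
def Borderless (p : List Char) : Prop :=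
  ∀ j, j < p.length → 0 < j → ¬ (p.drop j).isPrefixOf p
theorem no_overlap (p l : List Char) (hb : Borderless p) (hp : p.isPrefixOf l)
    (j : Nat) (h0 : 0 < j) (hj : j < p.length) : ¬ p.isPrefixOf (l.drop j) := by
  intro h
  rw [List.isPrefixOf_iff_prefix] at hp h
  obtain ⟨r, rfl⟩ := hp
  rw [List.drop_append_of_le_length (by omega)] at h
  have h1 : p.drop j <+: p.drop j ++ r := List.prefix_append _ _
  have h2 : p.drop j <+: p :=
    List.prefix_of_prefix_length_le h1 h (by simp)
  exact hb j hj h0 (List.isPrefixOf_iff_prefix.mpr h2)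
theorem occCount_drop_eq (p l : List Char) (hb : Borderless p) (hp : p.isPrefixOf l) :
    ∀ j, 0 < j → j ≤ p.length → occCount p (l.drop j) = occCount p (l.drop p.length) := by
  have hpl : p.length ≤ l.length := (List.isPrefixOf_iff_prefix.mp hp).length_le
  intro j h0 hj
  induction hk : p.length - j generalizing j with
  | zero => have : j = p.length := by omega
            subst this; rfl
  | succ k ih =>
    have hjp : j < p.length := by omega
    have hjl : j < l.length := by omega
    have hdrop : l.drop j = l[j] :: l.drop (j + 1) := List.drop_eq_getElem_cons hjl
    rw [hdrop, occCount_cons, ← hdrop]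
    rw [if_neg (no_overlap p l hb hp j h0 hjp)]
    simpa using ih (j + 1) (by omega) (by omega) (by omega)
theorem occCount_of_prefix (p l : List Char) (hne : p ≠ []) (hb : Borderless p)
    (hp : p.isPrefixOf l) : occCount p l = 1 + occCount p (l.drop p.length) := by
  have hplen : 0 < p.length := List.length_pos_iff.mpr hne
  have hpl : p.length ≤ l.length := (List.isPrefixOf_iff_prefix.mp hp).length_le
  have hll : 0 < l.length := by omega
  have hdrop : l = l[0] :: l.drop 1 := by
    simpa using List.drop_eq_getElem_cons hll
  calc occCount p l = (if p.isPrefixOf l then 1 else 0) + occCount p (l.drop 1) := by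
        rw [hdrop, occCount_cons, ← hdrop]
    _ = 1 + occCount p (l.drop p.length) := by
        rw [if_pos hp]
        rcases Nat.eq_or_lt_of_le hplen with h1 | h1
        · rw [← h1]
        · rw [occCount_drop_eq p l hb hp 1 (by omega) (by omega)]
theorem count_go_eq (p : List Char) (hne : p ≠ []) (hb : Borderless p) :
    ∀ (fuel : Nat) (l : List Char) (acc : Nat), l.length ≤ fuel →
      PySem.Chars.count.go p fuel l acc = acc + occCount p l := by
  have hplen : 0 < p.length := List.length_pos_iff.mpr hne
  intro fuel
  induction fuel with
  | zero => intro l acc hl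
            have : l = [] := by
              cases l with
              | nil => rfl
              | cons a t => simp at hl
            subst this
            simp [PySem.Chars.count.go, occCount]
  | succ fuel ih =>
    intro l acc hl
    cases l with
    | nil => simp [PySem.Chars.count.go, occCount]
    | cons c t =>
      by_cases h : p.isPrefixOf (c :: t)
      · rw [show PySem.Chars.count.go p (fuel+1) (c :: t) acc
            = PySem.Chars.count.go p fuel ((c :: t).drop p.length) (acc + 1) from by
          simp [PySem.Chars.count.go, h]]
        rw [ih _ _ (by simp at hl ⊢; omega)]
        rw [occCount_of_prefix p (c :: t) hne hb h]
        omega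
      · rw [show PySem.Chars.count.go p (fuel+1) (c :: t) acc
            = PySem.Chars.count.go p fuel t acc from by
          simp [PySem.Chars.count.go, h]]
        rw [ih _ _ (by simp at hl; omega)]
        rw [occCount_cons, if_neg h]; omega
theorem chars_count_eq_occCount (p l : List Char) (hne : p ≠ []) (hb : Borderless p) :
    PySem.Chars.count l p = occCount p l := by
  rw [PySem.Chars.count]
  rw [if_neg (by simp [hne])]
  simpa using count_go_eq p hne hb l.length l 0 le_rfl
theorem filter_ops (tl : List Char) (i : Nat) :
    (["one-time-event*", "continuous-event*"].filter
        (fun op => PySem.Chars.startswith (tl.drop i) op.toList))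
      = (if PySem.Chars.startswith (tl.drop i) "one-time-event*".toList then ["one-time-event*"] else [])
        ++ (if PySem.Chars.startswith (tl.drop i) "continuous-event*".toList then ["continuous-event*"] else []) := by
  simp only [List.filter_cons, List.filter_nil]
  split_ifs <;> simp_all

theorem found_facts (tl : List Char) (is : List Nat) :
    (is.flatMap (fun i => (["one-time-event*", "continuous-event*"].filter
        (fun op => PySem.Chars.startswith (tl.drop i) op.toList)))).length
      = is.countP (fun i => PySem.Chars.startswith (tl.drop i) "one-time-event*".toList)
        + is.countP (fun i => PySem.Chars.startswith (tl.drop i) "continuous-event*".toList)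
    ∧ (is.flatMap (fun i => (["one-time-event*", "continuous-event*"].filter
        (fun op => PySem.Chars.startswith (tl.drop i) op.toList)))).count "one-time-event*"
      = is.countP (fun i => PySem.Chars.startswith (tl.drop i) "one-time-event*".toList)
    ∧ (is.flatMap (fun i => (["one-time-event*", "continuous-event*"].filter
        (fun op => PySem.Chars.startswith (tl.drop i) op.toList)))).count "continuous-event*"
      = is.countP (fun i => PySem.Chars.startswith (tl.drop i) "continuous-event*".toList) := by
  have e1 : "one-time-event*".toList = ['o','n','e','-','t','i','m','e','-','e','v','e','n','t','*'] := rfl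
  have e2 : "continuous-event*".toList = ['c','o','n','t','i','n','u','o','u','s','-','e','v','e','n','t','*'] := rfl
  induction is with
  | nil => simp
  | cons i rest ih =>
    obtain ⟨ihl, ihc1, ihc2⟩ := ih
    rw [List.flatMap_cons, filter_ops]
    simp only [List.length_append, List.count_append, List.countP_cons, ihl, ihc1, ihc2, e1, e2]
    split_ifs <;> simp <;> omega

theorem occCount_eq_countP_startswith (p l : List Char) :
    (List.range l.length).countP (fun i => PySem.Chars.startswith (l.drop i) p) = occCount p l := rfl

theorem main_equiv (text : String) : extractContractType text = extractContractType_alt text := by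
  have hb1 : Borderless "one-time-event*".toList := by unfold Borderless; decide
  have hb2 : Borderless "continuous-event*".toList := by unfold Borderless; decide
  have hc1 : PySem.Str.count text "one-time-event*"
      = occCount "one-time-event*".toList text.toList := by
    rw [PySem.Str.count_eq]
    exact chars_count_eq_occCount _ _ (by decide) hb1
  have hc2 : PySem.Str.count text "continuous-event*"
      = occCount "continuous-event*".toList text.toList := by
    rw [PySem.Str.count_eq]
    exact chars_count_eq_occCount _ _ (by decide) hb2
  obtain ⟨hfl, hf1, hf2⟩ := found_facts text.toList (List.range text.toList.length)
  simp only [occCount_eq_countP_startswith] at hfl hf1 hf2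
  unfold extractContractType extractContractType_alt
  simp only [extractA_loop]
  set a := occCount "one-time-event*".toList text.toList with ha
  set b := occCount "continuous-event*".toList text.toList with hbv
  set found := (List.range text.toList.length).flatMap
    (fun i => (["one-time-event*", "continuous-event*"].filter
      (fun op => PySem.Chars.startswith (text.toList.drop i) op.toList))) with hfound
  rw [hc1, hc2]
  rcases Nat.lt_or_ge (a + b) 2 with hlt | hge
  · have hnot : ¬ found.length > 1 := by omega
    rw [if_neg hnot]
    have hcase : a = 0 ∧ b = 0 ∨ a = 1 ∧ b = 0 ∨ a = 0 ∧ b = 1 := by omega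
    rcases hcase with ⟨ha0, hb0⟩ | ⟨ha1, hb0⟩ | ⟨ha0, hb1⟩
    · have hfe : found = [] := List.length_eq_zero_iff.mp (by omega)
      rw [hfe, ha0, hb0]
      norm_num
    · obtain ⟨f, hfe⟩ := List.length_eq_one_iff.mp (by omega : found.length = 1)
      have hfeq : f = "one-time-event*" := by
        rw [hfe, ha1] at hf1
        by_contra hne
        simp [hne] at hf1
      rw [hfe, hfeq]
      simp [ha1, hb0]
    · obtain ⟨f, hfe⟩ := List.length_eq_one_iff.mp (by omega : found.length = 1)
      have hfeq : f = "continuous-event*" := by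
        rw [hfe, hb1] at hf2
        by_contra hne
        simp [hne] at hf2
      rw [hfe, hfeq]
      simp [ha0, hb1]
  · -- both sides return 'Too many'
    have hflen : found.length > 1 := by omega
    rw [if_pos hflen]
    split_ifs <;> first | rfl | (exfalso; omega)

-- ===== VERDICT (by name: the statement is the Claim_ definition above) =====
theorem extractContractType_spec : Claim_equal_extractContractType := by
  intro text _
  exact main_equiv text
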